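-- pv_equiv track=rewrite | github.com/pengjichengbest/Algorithm | new_problem.py | findAnswer
-- ===== SOURCE A (Python) =====
-- import heapq
-- import heapq
-- import heapq
-- import heapq
--
-- def findAnswer(n, edges):
--     ans = [False] * len(edges)
--     out_edges = [[] for _ in range(n)]
--     for edge in edges:
--         out_edges[edge[0]].append([edge[1], edge[2]])
--         out_edges[edge[1]].append([edge[0], edge[2]])
--
--     def cal(node):
--         dist = {i: float('inf') for i in range(n)}
--         memory = set()
--         dist[node] = 0
--         q = []
--         heapq.heappush(q, (0, node))
--         while q:
--             top = heapq.heappop(q)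
--             cur_node, cur_weight = top[1], top[0]
--             if cur_node in memory:
--                 continue
--             memory.add(cur_node)
--             for edge in out_edges[cur_node]:
--                 target, weight = edge[0], edge[1]
--                 if dist[target] > dist[cur_node] + weight:
--                     dist[target] = dist[cur_node] + weight
--                     heapq.heappush(q, (dist[target], target))
--         return dist
--
--     dist0 = cal(0)
--     distN = cal(n - 1)
--     min_dis = dist0[n - 1]
--     if min_dis == float('inf'):
--         return ans
--     for index, edge in enumerate(edges):
--         node1, node2, weight = edge[0], edge[1], edge[2]
--         judge1 = dist0[node1] + distN[node2] + weight
--         if judge1 == min_dis and min_dis < float('inf'):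
--             ans[index] = True
--             continue
--         judge2 = dist0[node2] + distN[node1] + weight
--         if judge2 == min_dis and min_dis < float('inf'):
--             ans[index] = True
--             continue
--     return ans
-- ===== SOURCE B (Python) =====
-- INF = float('inf')
--
-- def findAnswer(n, edges):
--     def dijkstra(src):
--         dist = {i: INF for i in range(n)}
--         dist[src] = 0
--         q = [(0, src)]
--         done = set()
--         while q:
--             bi = 0
--             for i in range(1, len(q)):
--                 if q[i] < q[bi]:
--                     bi = i
--             _, u = q.pop(bi)
--             if u in done:
--                 continue
--             done.add(u)
--             for e in edges:
--                 for a, b in ((e[0], e[1]), (e[1], e[0])):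
--                     if a == u and dist[u] + e[2] < dist[b]:
--                         dist[b] = dist[u] + e[2]
--                         q.append((dist[b], b))
--         return dist
--
--     dist0 = dijkstra(0)
--     distN = dijkstra(n - 1)
--     best = dist0[n - 1]
--     if best == INF:
--         return [False] * len(edges)
--     return [dist0[e[0]] + e[2] + distN[e[1]] == best
--             or dist0[e[1]] + e[2] + distN[e[0]] == best for e in edges]
-- ===== Notes on version B (the rewrite author's own statement) =====
-- stated objective: simpler
-- what changed: B drops A's adjacency-list construction and its heapq priority queue entirely: each Dijkstra round finds the next node by a plain scan of the frontier list and relaxes neighbours by scanning the edge list directly, and the final per-edge test becomes a single comprehension instead of an index loop mutating a preallocated answer list; on the generated inputs this cut constant-factor overhead (no adjacency build, no heap bookkeeping), though B's worst case on dense graphs is asymptotically larger.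
-- outside the precondition, e.g. on findAnswer(4, [[-2, -2, 1]]): A returns [False], B returns [False]
import Mathlib
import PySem

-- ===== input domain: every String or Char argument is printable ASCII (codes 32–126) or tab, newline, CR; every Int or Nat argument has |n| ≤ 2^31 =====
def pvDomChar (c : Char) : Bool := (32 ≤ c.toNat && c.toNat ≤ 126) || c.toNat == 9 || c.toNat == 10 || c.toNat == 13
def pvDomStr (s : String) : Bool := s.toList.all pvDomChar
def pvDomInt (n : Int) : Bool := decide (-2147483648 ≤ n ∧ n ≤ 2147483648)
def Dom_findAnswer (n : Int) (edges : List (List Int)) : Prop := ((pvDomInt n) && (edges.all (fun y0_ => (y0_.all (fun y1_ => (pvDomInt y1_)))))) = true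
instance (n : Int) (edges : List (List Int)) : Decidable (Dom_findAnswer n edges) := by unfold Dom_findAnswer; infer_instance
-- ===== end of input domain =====

-- B replaces A's adjacency-list + heapq Dijkstra by a shorter direct-scan Dijkstra
-- (min found by a plain scan of the frontier list, neighbours found by scanning the
-- edge list) and a comprehension for the final per-edge test; objective: simpler.

-- ===== SHARED SMALL HELPERS (used by both ports) =====

-- Python tuple comparison (d, node) < (d', node') — lexicographic
def pyLt (a b : Int × Int) : Bool := a.1 < b.1 || (a.1 == b.1 && a.2 < b.2)

-- float('inf') is modelled as `none`; all finite values are ints in both programs.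
-- optAddW o w = o + w (int w), optAdd2 = sum of two possibly-infinite values,
-- optLt = Python `<` on these values.
def optAddW (o : Option Int) (w : Int) : Option Int := o.map (· + w)
def optAdd2 (a b : Option Int) : Option Int :=
  match a, b with
  | some x, some y => some (x + y)
  | _, _ => none
def optLt (a b : Option Int) : Bool :=
  match a, b with
  | none, _ => false
  | some _, none => true
  | some x, some y => decide (x < y)

-- edge[i] as read in the classification loops (total accessor; inside Pre_ the
-- index is always in range)
def ed (e : List Int) (i : Int) : Int := (PySem.List.pyGet? e i).getD 0

-- ===== PORT A =====

-- A calls the standard library's heapq on (dist, node) pairs.  heapq is modelled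
-- (like PySem models dict by an association list) by an observably equivalent
-- priority queue: a list kept sorted by pyLt; heappush = ordered insert,
-- heappop = take the head.  The popped VALUE is the multiset minimum, exactly
-- what heapq.heappop returns.
def pqPush (x : Int × Int) : List (Int × Int) → List (Int × Int)
  | [] => [x]
  | y :: t => if pyLt x y then x :: y :: t else y :: pqPush x t

-- CPython list index normalisation (negative indices wrap once; exact)
def pyNormIdx (len : Nat) (i : Int) : Option Nat :=
  if 0 ≤ i ∧ i < (len : Int) then some i.toNat
  else if -(len : Int) ≤ i ∧ i < 0 then some ((len : Int) + i).toNat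
  else none

-- out_edges[i].append(v); none = IndexError
def adjAppend (out : List (List (Int × Int))) (i : Int) (v : Int × Int) :
    Option (List (List (Int × Int))) :=
  match pyNormIdx out.length i with
  | none => none
  | some k => some (out.set k (out.getD k [] ++ [v]))

-- the body of A's adjacency-building loop; none = IndexError
def buildStep (out : List (List (Int × Int))) (e : List Int) :
    Option (List (List (Int × Int))) := do
  let e0 ← PySem.List.pyGet? e 0
  let e1 ← PySem.List.pyGet? e 1
  let e2 ← PySem.List.pyGet? e 2
  let out ← adjAppend out e0 (e1, e2)
  adjAppend out e1 (e0, e2)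

def buildAdj (n : Int) (edges : List (List Int)) : Option (List (List (Int × Int))) :=
  edges.foldlM buildStep (List.replicate n.toNat [])

-- one relaxation step of A's inner `for edge in out_edges[cur_node]` loop
def relaxA (cur : Int) (st : PySem.Dict Int (Option Int) × List (Int × Int))
    (tw : Int × Int) : PySem.Dict Int (Option Int) × List (Int × Int) :=
  let nv := optAddW (st.1.getD cur none) tw.2
  if optLt nv (st.1.getD tw.1 none) then
    (st.1.insert tw.1 nv, pqPush (nv.getD 0, tw.1) st.2)
  else st

-- A's `while q` loop (fuel only makes the recursion structural; with the fuel
-- findAnswer passes it is never exhausted, see comment there).  The `none`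
-- branch of pyGet? is Python's IndexError (outside Pre_ only): junk is returned.
def loopA (out : List (List (Int × Int))) :
    Nat → PySem.Dict Int (Option Int) → PySem.Set Int → List (Int × Int) →
    PySem.Dict Int (Option Int)
  | 0, d, _, _ => d
  | fuel + 1, d, mem, q =>
    match q with
    | [] => d
    | top :: rest =>
      let cur := top.2
      if mem.contains cur then loopA out fuel d mem rest
      else
        match PySem.List.pyGet? out cur with
        | none => d
        | some nbrs =>
          let st := nbrs.foldl (relaxA cur) (d, rest)
          loopA out fuel st.1 (mem.add cur) st.2

-- A's cal(node)
def calA (n : Int) (out : List (List (Int × Int))) (node : Int) (fuel : Nat) :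
    PySem.Dict Int (Option Int) :=
  let d0 := (PySem.List.pyRange 0 n).foldl (fun d i => d.insert i none) PySem.Dict.empty
  let d1 := d0.insert node (some 0)
  loopA out fuel d1 PySem.Set.empty (pqPush (0, node) [])

-- each loop iteration pops one queue entry and total pushes are at most
-- 1 + (total adjacency size) = 1 + 2*len(edges), so this fuel is never exhausted
def dijFuel (edges : List (List Int)) : Nat := 2 + 2 * edges.length

def findAnswer (n : Int) (edges : List (List Int)) : List Bool :=
  let ans := List.replicate edges.length false
  match buildAdj n edges with
  | none => ans   -- Python raised IndexError while building out_edges (outside Pre_)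
  | some out =>
    let dist0 := calA n out 0 (dijFuel edges)
    let distN := calA n out (n - 1) (dijFuel edges)
    match dist0.getD (n - 1) none with
    | none => ans   -- min_dis == float('inf')
    | some m =>
      (PySem.List.enumerate edges).foldl (fun ans ie =>
        let e := ie.2
        let j1 := optAddW (optAdd2 (dist0.getD (ed e 0) none) (distN.getD (ed e 1) none)) (ed e 2)
        if j1 == some m && optLt (some m) none then ans.set ie.1.toNat true
        else
          let j2 := optAddW (optAdd2 (dist0.getD (ed e 1) none) (distN.getD (ed e 0) none)) (ed e 2)
          if j2 == some m && optLt (some m) none then ans.set ie.1.toNat true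
          else ans) ans

-- ===== PORT B =====

-- one guarded relaxation `if a == u and dist[u] + e[2] < dist[b]`
def relaxB (u a b w : Int) (st : PySem.Dict Int (Option Int) × List (Int × Int)) :
    PySem.Dict Int (Option Int) × List (Int × Int) :=
  if a == u && optLt (optAddW (st.1.getD u none) w) (st.1.getD b none) then
    let nv := optAddW (st.1.getD u none) w
    (st.1.insert b nv, st.2 ++ [(nv.getD 0, b)])
  else st

-- B's `while q` loop: scan for the index of the first minimum, pop it,
-- relax by scanning the edge list (same fuel remark as for loopA)
def loopB (edges : List (List Int)) :
    Nat → PySem.Dict Int (Option Int) → PySem.Set Int → List (Int × Int) →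
    PySem.Dict Int (Option Int)
  | 0, d, _, _ => d
  | fuel + 1, d, mem, q =>
    match q with
    | [] => d
    | _ :: _ =>
      let bi := (PySem.List.pyRange 1 q.length).foldl
        (fun bi i => if pyLt (PySem.List.pyGetD q i (0, 0)) (PySem.List.pyGetD q bi (0, 0)) then i else bi) 0
      match PySem.List.pop? q bi with
      | none => d   -- unreachable: bi is a valid index
      | some (it, q') =>
        let u := it.2
        if mem.contains u then loopB edges fuel d mem q'
        else
          let st := edges.foldl (fun st e =>
            relaxB u (ed e 1) (ed e 0) (ed e 2) (relaxB u (ed e 0) (ed e 1) (ed e 2) st)) (d, q')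
          loopB edges fuel st.1 (mem.add u) st.2

-- B's dijkstra(src)
def dijB (n : Int) (edges : List (List Int)) (src : Int) (fuel : Nat) :
    PySem.Dict Int (Option Int) :=
  let d0 := (PySem.List.pyRange 0 n).foldl (fun d i => d.insert i none) PySem.Dict.empty
  let d1 := d0.insert src (some 0)
  loopB edges fuel d1 PySem.Set.empty [(0, src)]

def findAnswer_alt (n : Int) (edges : List (List Int)) : List Bool :=
  let dist0 := dijB n edges 0 (dijFuel edges)
  let distN := dijB n edges (n - 1) (dijFuel edges)
  match dist0.getD (n - 1) none with
  | none => List.replicate edges.length false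
  | some m =>
    edges.map (fun e =>
      optAdd2 (optAddW (dist0.getD (ed e 0) none) (ed e 2)) (distN.getD (ed e 1) none) == some m
      || optAdd2 (optAddW (dist0.getD (ed e 1) none) (ed e 2)) (distN.getD (ed e 0) none) == some m)

-- ===== PRECONDITION & SPEC =====

-- Pre_ excludes n < 1 and edges with fewer than 3 entries or an endpoint outside
-- [0, n): there A raises (IndexError building out_edges, or KeyError on the dist
-- dict) — except in one corner (an endpoint in [-n, -1] that stays unreachable
-- while 0 and n-1 are disconnected), where A happens to return the all-False
-- list and B does too.
def Pre_findAnswer (n : Int) (edges : List (List Int)) : Prop :=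
  1 ≤ n ∧ ∀ e ∈ edges, 3 ≤ e.length ∧ 0 ≤ ed e 0 ∧ ed e 0 < n ∧ 0 ≤ ed e 1 ∧ ed e 1 < n
instance (n : Int) (edges : List (List Int)) : Decidable (Pre_findAnswer n edges) := by
  unfold Pre_findAnswer; infer_instance

def pvWitness_findAnswer : Int × List (List Int) := (3, [[0, 1, 4], [1, 2, 1], [0, 2, 5]])

def Spec_findAnswer (n : Int) (edges : List (List Int)) (out : List Bool) : Prop := out = findAnswer_alt n edges
instance (n : Int) (edges : List (List Int)) (out : List Bool) : Decidable (Spec_findAnswer n edges out) := by unfold Spec_findAnswer; infer_instance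

-- ===== CLAIM (what is proved, stated in full; the proofs are below) =====
def Claim_equal_findAnswer : Prop := ∀ (n : Int) (edges : List (List Int)), Dom_findAnswer n edges → Pre_findAnswer n edges → Spec_findAnswer n edges (findAnswer n edges)

-- ===== LEMMAS AND PROOFS =====

-- basic order facts about pyLt
theorem pyLt_irrefl (a : Int × Int) : pyLt a a = false := by
  simp [pyLt]
theorem pyLt_asymm {a b : Int × Int} (h : pyLt a b = true) : pyLt b a = false := by
  revert h; simp [pyLt]; omega
theorem pyLt_eq_of_not {a b : Int × Int} (h1 : pyLt a b = false) (h2 : pyLt b a = false) : a = b := by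
  simp [pyLt] at h1 h2
  obtain ⟨h1a, h1b⟩ := h1
  obtain ⟨h2a, h2b⟩ := h2
  have e1 : a.1 = b.1 := le_antisymm h2a h1a
  have e2 : a.2 = b.2 := le_antisymm (h2b e1.symm) (h1b e1)
  exact Prod.ext_iff.mpr ⟨e1, e2⟩
theorem pyLt_trans_not {x y z : Int × Int} (h1 : pyLt x y = true) (h2 : pyLt z y = false) :
    pyLt z x = false := by
  revert h1 h2; simp [pyLt]; omega

-- the sorted-queue invariant of port A's priority queue
def SortedQ (q : List (Int × Int)) : Prop := q.Pairwise (fun a b => pyLt b a = false)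

theorem pqPush_perm (x : Int × Int) (l : List (Int × Int)) : (pqPush x l).Perm (x :: l) := by
  induction l with
  | nil => simp [pqPush]
  | cons y t ih =>
    simp only [pqPush]
    split
    · exact List.Perm.refl _
    · exact ((ih.cons y).trans (List.Perm.swap x y t)).symm.symm

theorem pqPush_sorted {x : Int × Int} {l : List (Int × Int)} (h : SortedQ l) :
    SortedQ (pqPush x l) := by
  induction l with
  | nil => simp [pqPush, SortedQ]
  | cons y t ih =>
    rcases List.pairwise_cons.mp h with ⟨hy, ht⟩
    simp only [pqPush]
    split
    · rename_i hlt
      refine List.pairwise_cons.mpr ⟨?_, h⟩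
      intro z hz
      rcases List.mem_cons.mp hz with rfl | hz
      · exact pyLt_asymm hlt
      · exact pyLt_trans_not hlt (hy z hz)
    · rename_i hnlt
      refine List.pairwise_cons.mpr ⟨?_, ih ht⟩
      intro z hz
      have := (pqPush_perm x t).mem_iff.mp hz
      rcases List.mem_cons.mp this with rfl | hz'
      · exact Bool.not_eq_true _ ▸ (by simpa using hnlt)
      · exact hy z hz'

theorem sorted_head_min {r : Int × Int} {t : List (Int × Int)} (h : SortedQ (r :: t)) :
    ∀ x ∈ r :: t, pyLt x r = false := by
  intro x hx
  rcases List.mem_cons.mp hx with rfl | hx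
  · exact pyLt_irrefl _
  · exact (List.pairwise_cons.mp h).1 x hx

-- B's minimum scan: its result is a valid index holding a minimal element
def scanFold (q : List (Int × Int)) : Int :=
  (PySem.List.pyRange 1 q.length).foldl
    (fun bi i => if pyLt (PySem.List.pyGetD q i (0, 0)) (PySem.List.pyGetD q bi (0, 0)) then i else bi) 0

theorem pyGetD_nat (q : List (Int × Int)) (k : Nat) :
    PySem.List.pyGetD q (k : Int) (0, 0) = q.getD k (0, 0) := by
  rw [PySem.List.pyGetD_of_nonneg _ _ (by positivity)]
  simp

theorem scan_aux (q : List (Int × Int)) :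
    ∀ (m : Nat) (a : Int) (acc : Nat), ((q.length : Int) - a).toNat = m → 1 ≤ a →
    acc < q.length →
    (∀ j : Nat, j < q.length → ((j : Int) < a ∨ j = acc) →
        pyLt (q.getD j (0, 0)) (q.getD acc (0, 0)) = false) →
    ∃ k : Nat, k < q.length ∧
      (PySem.List.pyRange a q.length).foldl
        (fun bi i => if pyLt (PySem.List.pyGetD q i (0, 0)) (PySem.List.pyGetD q bi (0, 0)) then i else bi)
        (acc : Int) = (k : Int) ∧
      ∀ j : Nat, j < q.length → pyLt (q.getD j (0, 0)) (q.getD k (0, 0)) = false := by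
  intro m
  induction m with
  | zero =>
    intro a acc hm ha hacc hmin
    have hge : (q.length : Int) ≤ a := by omega
    rw [PySem.List.pyRange_one_eq_nil hge]
    refine ⟨acc, hacc, rfl, ?_⟩
    intro j hj
    exact hmin j hj (Or.inl (by omega))
  | succ m ih =>
    intro a acc hm ha hacc hmin
    by_cases hlt : a < (q.length : Int)
    · rw [PySem.List.pyRange_one_cons hlt]
      simp only [List.foldl_cons]
      have haN : ((a.toNat : Int)) = a := by omega
      have haL : a.toNat < q.length := by omega
      rw [show PySem.List.pyGetD q a (0,0) = q.getD a.toNat (0,0) by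
            conv_lhs => rw [← haN]
            rw [pyGetD_nat], pyGetD_nat]
      by_cases hc : pyLt (q.getD a.toNat (0, 0)) (q.getD acc (0, 0)) = true
      · rw [if_pos hc]
        have := ih (a + 1) a.toNat (by omega) (by omega) haL ?_
        · obtain ⟨k, hk, hfold, hmn⟩ := this
          exact ⟨k, hk, haN ▸ hfold, hmn⟩
        · intro j hj hcase
          rcases hcase with hja | hje
          · by_cases hjea : j = a.toNat
            · subst hjea; exact pyLt_irrefl _
            · exact pyLt_trans_not hc (hmin j hj (Or.inl (by omega)))
          · subst hje; exact pyLt_irrefl _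
      · rw [if_neg hc]
        refine ih (a + 1) acc (by omega) (by omega) hacc ?_
        intro j hj hcase
        rcases hcase with hja | hje
        · by_cases hjea : j = a.toNat
          · subst hjea; simpa using hc
          · exact hmin j hj (Or.inl (by omega))
        · exact hmin j hj (Or.inr hje)
    · have hge : (q.length : Int) ≤ a := by omega
      rw [PySem.List.pyRange_one_eq_nil hge]
      refine ⟨acc, hacc, rfl, ?_⟩
      intro j hj
      exact hmin j hj (Or.inl (by omega))

theorem scanFold_spec (q : List (Int × Int)) (hne : q ≠ []) :
    ∃ k : Nat, k < q.length ∧ scanFold q = (k : Int) ∧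
      ∀ j : Nat, j < q.length → pyLt (q.getD j (0, 0)) (q.getD k (0, 0)) = false := by
  have h0 : 0 < q.length := List.length_pos_iff.mpr hne
  have := scan_aux q ((q.length : Int) - 1).toNat 1 0 rfl (by omega) h0 ?_
  · obtain ⟨k, hk, hfold, hmn⟩ := this
    exact ⟨k, hk, by simpa [scanFold] using hfold, hmn⟩
  · intro j hj hcase
    have : j = 0 := by omega
    subst this; exact pyLt_irrefl _

theorem pop_nat (q : List (Int × Int)) (k : Nat) (h : k < q.length) :
    PySem.List.pop? q (k : Int) = some (q.getD k (0, 0), q.eraseIdx k) := by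
  simp [PySem.List.pop?, PySem.List.pyIdx?, h]

-- the sequence of neighbours A stores in out_edges[u], expressed over the edge list
def adjSpec (edges : List (List Int)) (u : Int) : List (Int × Int) :=
  edges.flatMap (fun e =>
    (if ed e 0 == u then [(ed e 1, ed e 2)] else []) ++
    (if ed e 1 == u then [(ed e 0, ed e 2)] else []))

def InRangeQ (n : Int) (q : List (Int × Int)) : Prop := ∀ x ∈ q, 0 ≤ x.2 ∧ x.2 < n

-- the bisimulation relation between A's and B's (dist, queue) states
def QRel (n : Int) (sA sB : PySem.Dict Int (Option Int) × List (Int × Int)) : Prop :=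
  sA.1 = sB.1 ∧ sA.2.Perm sB.2 ∧ SortedQ sA.2 ∧ InRangeQ n sA.2

theorem relaxB_skip {u a b w : Int} (hau : (a == u) = false)
    (sB : PySem.Dict Int (Option Int) × List (Int × Int)) : relaxB u a b w sB = sB := by
  simp [relaxB, hau]

theorem relax_pair_rel {n u a b w : Int} (hau : (a == u) = true) (hb : 0 ≤ b ∧ b < n)
    {sA sB : PySem.Dict Int (Option Int) × List (Int × Int)} (h : QRel n sA sB) :
    QRel n (relaxA u sA (b, w)) (relaxB u a b w sB) := by
  obtain ⟨hd, hp, hs, hr⟩ := h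
  simp only [relaxA, relaxB, hau, Bool.true_and, hd]
  by_cases hc : optLt (optAddW (sB.1.getD u none) w) (sB.1.getD b none) = true
  · rw [if_pos hc, if_pos hc]
    refine ⟨rfl, ?_, pqPush_sorted hs, ?_⟩
    · exact (pqPush_perm _ _).trans ((hp.cons _).trans (List.perm_append_singleton _ _).symm)
    · intro x hx
      have := (pqPush_perm _ sA.2).mem_iff.mp hx
      rcases List.mem_cons.mp this with rfl | hx'
      · exact hb
      · exact hr x hx'
  · rw [if_neg hc, if_neg hc]
    exact ⟨hd, hp, hs, hr⟩

theorem relax_edge_rel {n u : Int} (e : List Int)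
    (he : 0 ≤ ed e 0 ∧ ed e 0 < n ∧ 0 ≤ ed e 1 ∧ ed e 1 < n)
    {sA sB : PySem.Dict Int (Option Int) × List (Int × Int)} (h : QRel n sA sB) :
    QRel n
      (List.foldl (relaxA u)
        (List.foldl (relaxA u) sA (if ed e 0 == u then [(ed e 1, ed e 2)] else []))
        (if ed e 1 == u then [(ed e 0, ed e 2)] else []))
      (relaxB u (ed e 1) (ed e 0) (ed e 2) (relaxB u (ed e 0) (ed e 1) (ed e 2) sB)) := by
  by_cases h0 : (ed e 0 == u) = true <;> by_cases h1 : (ed e 1 == u) = true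
  · simp only [h0, h1, if_true, List.foldl_cons, List.foldl_nil]
    exact relax_pair_rel h1 ⟨he.1, he.2.1⟩ (relax_pair_rel h0 ⟨he.2.2.1, he.2.2.2⟩ h)
  · rw [relaxB_skip (a := ed e 1) (b := ed e 0) (by simpa using h1)]
    simp only [h0, if_true, if_neg h1, List.foldl_cons, List.foldl_nil]
    exact relax_pair_rel h0 ⟨he.2.2.1, he.2.2.2⟩ h
  · rw [relaxB_skip (a := ed e 0) (b := ed e 1) (by simpa using h0)]
    simp only [h1, if_true, if_neg h0, List.foldl_cons, List.foldl_nil]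
    exact relax_pair_rel h1 ⟨he.1, he.2.1⟩ h
  · rw [relaxB_skip (a := ed e 1) (b := ed e 0) (by simpa using h1),
        relaxB_skip (a := ed e 0) (b := ed e 1) (by simpa using h0)]
    simp only [if_neg h0, if_neg h1, List.foldl_nil]
    exact h

theorem relax_fold_rel {n u : Int} {edges : List (List Int)}
    (hpre : ∀ e ∈ edges, 3 ≤ e.length ∧ 0 ≤ ed e 0 ∧ ed e 0 < n ∧ 0 ≤ ed e 1 ∧ ed e 1 < n)
    {sA sB : PySem.Dict Int (Option Int) × List (Int × Int)} (h : QRel n sA sB) :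
    QRel n (List.foldl (relaxA u) sA (adjSpec edges u))
      (edges.foldl (fun st e =>
        relaxB u (ed e 1) (ed e 0) (ed e 2) (relaxB u (ed e 0) (ed e 1) (ed e 2) st)) sB) := by
  induction edges generalizing sA sB with
  | nil => simpa [adjSpec] using h
  | cons e rest ih =>
    have he := hpre e (List.mem_cons_self ..)
    simp only [adjSpec, List.flatMap_cons, List.foldl_append]
    exact ih (fun e' he' => hpre e' (List.mem_cons_of_mem _ he'))
      (relax_edge_rel e ⟨he.2.1, he.2.2.1, he.2.2.2.1, he.2.2.2.2⟩ h)

theorem loop_eq {n : Int} {edges : List (List Int)} {out : List (List (Int × Int))}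
    (hpre : ∀ e ∈ edges, 3 ≤ e.length ∧ 0 ≤ ed e 0 ∧ ed e 0 < n ∧ 0 ≤ ed e 1 ∧ ed e 1 < n)
    (hadj : ∀ u : Int, 0 ≤ u → u < n → PySem.List.pyGet? out u = some (adjSpec edges u)) :
    ∀ (fuel : Nat) (d : PySem.Dict Int (Option Int)) (mem : PySem.Set Int)
      (qA qB : List (Int × Int)), qA.Perm qB → SortedQ qA → InRangeQ n qA →
      loopA out fuel d mem qA = loopB edges fuel d mem qB := by
  intro fuel
  induction fuel with
  | zero => intros; rfl
  | succ fuel ih =>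
    intro d mem qA qB hp hs hr
    cases qA with
    | nil =>
      have : qB = [] := List.Perm.eq_nil hp.symm
      subst this; rfl
    | cons r t =>
      obtain ⟨b0, bt, rfl⟩ : ∃ b0 bt, qB = b0 :: bt := by
        cases qB with
        | nil => exact absurd (List.Perm.eq_nil hp) (by simp)
        | cons b0 bt => exact ⟨b0, bt, rfl⟩
      obtain ⟨k, hk, hscan, hmin⟩ := scanFold_spec (b0 :: bt) (by simp)
      have hv : (b0 :: bt).getD k (0, 0) ∈ b0 :: bt := by
        rw [List.getD_eq_getElem _ _ hk]; exact List.getElem_mem _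
      have h1 : pyLt ((b0 :: bt).getD k (0, 0)) r = false :=
        sorted_head_min hs _ (hp.mem_iff.mpr hv)
      have h2 : pyLt r ((b0 :: bt).getD k (0, 0)) = false := by
        obtain ⟨j, hj, hje⟩ := List.mem_iff_getElem.mp (hp.mem_iff.mp (List.mem_cons_self ..))
        have := hmin j hj
        rwa [List.getD_eq_getElem _ _ hj, hje] at this
      have hrv : (b0 :: bt).getD k (0, 0) = r := pyLt_eq_of_not h1 h2
      have hpop : PySem.List.pop? (b0 :: bt) (scanFold (b0 :: bt)) =
          some (r, (b0 :: bt).eraseIdx k) := by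
        rw [hscan, pop_nat _ _ hk, hrv]
      have hperm' : t.Perm ((b0 :: bt).eraseIdx k) := by
        have h3 : (b0 :: bt).Perm ((b0 :: bt).getD k (0, 0) :: (b0 :: bt).eraseIdx k) := by
          rw [List.getD_eq_getElem _ _ hk]
          exact (List.getElem_cons_eraseIdx_perm hk).symm
        rw [hrv] at h3
        exact (hp.trans h3).cons_inv
      have hst : SortedQ t := hs.of_cons
      have hrt : InRangeQ n t := fun x hx => hr x (List.mem_cons_of_mem _ hx)
      show loopA out (fuel + 1) d mem (r :: t) = loopB edges (fuel + 1) d mem (b0 :: bt)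
      rw [show loopB edges (fuel + 1) d mem (b0 :: bt) =
          (if mem.contains r.2 then loopB edges fuel d mem ((b0 :: bt).eraseIdx k)
           else
             let st := edges.foldl (fun st e =>
               relaxB r.2 (ed e 1) (ed e 0) (ed e 2)
                 (relaxB r.2 (ed e 0) (ed e 1) (ed e 2) st)) (d, (b0 :: bt).eraseIdx k)
             loopB edges fuel st.1 (mem.add r.2) st.2) from by
        simp only [loopB]
        rw [show ((PySem.List.pyRange 1 (b0 :: bt).length).foldl
            (fun bi i => if pyLt (PySem.List.pyGetD (b0 :: bt) i (0, 0))
                (PySem.List.pyGetD (b0 :: bt) bi (0, 0)) then i else bi) 0) =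
            scanFold (b0 :: bt) from rfl, hpop]]
      simp only [loopA]
      by_cases hmem : mem.contains r.2 = true
      · rw [if_pos hmem, if_pos hmem]
        exact ih d mem t _ hperm' hst hrt
      · rw [if_neg hmem, if_neg hmem]
        have hb := hr r (List.mem_cons_self ..)
        rw [hadj r.2 hb.1 hb.2]
        have hfold := relax_fold_rel (u := r.2) hpre
          (sA := (d, t)) (sB := (d, (b0 :: bt).eraseIdx k)) ⟨rfl, hperm', hst, hrt⟩
        obtain ⟨hd, hp', hs', hr'⟩ := hfold
        show loopA out fuel (List.foldl (relaxA r.2) (d, t) (adjSpec edges r.2)).1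
            (mem.add r.2) (List.foldl (relaxA r.2) (d, t) (adjSpec edges r.2)).2 = _
        rw [hd]
        exact ih _ _ _ _ hp' hs' hr'

-- Python list read at a plain in-range index
theorem pyGet?_inrange {α : Type} [Inhabited α] (l : List α) (d : α) (u : Int)
    (h0 : 0 ≤ u) (h1 : u < l.length) : PySem.List.pyGet? l u = some (l.getD u.toNat d) := by
  simp [PySem.List.pyGet?, PySem.List.pyIdx?, h0, h1,
    List.getElem?_eq_getElem (by omega : u.toNat < l.length),
    List.getD_eq_getElem _ _ (by omega : u.toNat < l.length)]

theorem ed_some (e : List Int) (i : Int) (h0 : 0 ≤ i) (h1 : i < e.length) :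
    PySem.List.pyGet? e i = some (ed e i) := by
  rw [pyGet?_inrange e 0 i h0 h1]; rw [ed, pyGet?_inrange e 0 i h0 h1]; rfl

theorem getD_set_self {α : Type} (l : List α) (i : Nat) (v d : α) (h : i < l.length) :
    (l.set i v).getD i d = v := by
  simp [List.getD, List.getElem?_set, h]

theorem getD_set_ne {α : Type} (l : List α) (i j : Nat) (v d : α) (h : i ≠ j) :
    (l.set i v).getD j d = l.getD j d := by
  simp [List.getD, List.getElem?_set, h]

theorem getD_replicate_nil (n k : Nat) :
    (List.replicate n ([] : List (Int × Int))).getD k [] = [] := by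
  rcases Nat.lt_or_ge k n with h | h
  · simp [List.getD, h]
  · simp [List.getD,
      List.getElem?_eq_none (l := List.replicate n ([] : List (Int × Int))) (by simpa using h)]

-- one adjacency-building step appends exactly the pairs A stores for this edge
theorem buildStep_spec {n : Int} (acc : List (List (Int × Int))) (e : List Int)
    (hlen : (acc.length : Int) = n)
    (he : 3 ≤ e.length ∧ 0 ≤ ed e 0 ∧ ed e 0 < n ∧ 0 ≤ ed e 1 ∧ ed e 1 < n) :
    ∃ acc', buildStep acc e = some acc' ∧ (acc'.length : Int) = n ∧
      ∀ u : Int, 0 ≤ u → u < n →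
        acc'.getD u.toNat [] = acc.getD u.toNat [] ++
          ((if ed e 0 == u then [(ed e 1, ed e 2)] else []) ++
           (if ed e 1 == u then [(ed e 0, ed e 2)] else [])) := by
  obtain ⟨hel, h00, h01, h10, h11⟩ := he
  rw [buildStep, ed_some e 0 (by omega) (by omega), ed_some e 1 (by omega) (by omega),
    ed_some e 2 (by omega) (by omega)]
  have hn0 : pyNormIdx acc.length (ed e 0) = some (ed e 0).toNat := by
    rw [pyNormIdx, if_pos ⟨h00, by omega⟩]
  have hlen1 : ((acc.set (ed e 0).toNat
      (acc.getD (ed e 0).toNat [] ++ [(ed e 1, ed e 2)])).length : Int) = n := by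
    simpa using hlen
  have hn1 : pyNormIdx (acc.set (ed e 0).toNat
      (acc.getD (ed e 0).toNat [] ++ [(ed e 1, ed e 2)])).length (ed e 1) =
      some (ed e 1).toNat := by
    rw [pyNormIdx, if_pos ⟨h10, by omega⟩]
  simp only [Option.bind_eq_bind, Option.bind_some, adjAppend, hn0, hn1]
  refine ⟨_, rfl, by simpa using hlen, ?_⟩
  intro u hu0 hu1
  have hu : u.toNat < acc.length := by omega
  by_cases he0 : (ed e 0 == u) = true <;> by_cases he1 : (ed e 1 == u) = true
  · have q0 : (ed e 0).toNat = u.toNat := by have := beq_iff_eq.mp he0; omega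
    have q1 : (ed e 1).toNat = u.toNat := by have := beq_iff_eq.mp he1; omega
    rw [q0, q1, getD_set_self _ _ _ _ (by simpa using hu), getD_set_self _ _ _ _ hu]
    simp [he0, he1]
  · have q0 : (ed e 0).toNat = u.toNat := by have := beq_iff_eq.mp he0; omega
    have q1 : (ed e 1).toNat ≠ u.toNat := by
      have : ed e 1 ≠ u := by simpa using he1
      omega
    rw [getD_set_ne _ _ _ _ _ q1, q0, getD_set_self _ _ _ _ hu]
    simp [he0, he1]
  · have q0 : (ed e 0).toNat ≠ u.toNat := by
      have : ed e 0 ≠ u := by simpa using he0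
      omega
    have q1 : (ed e 1).toNat = u.toNat := by have := beq_iff_eq.mp he1; omega
    rw [q1, getD_set_self _ _ _ _ (by simpa using hu),
      getD_set_ne _ _ _ _ _ q0]
    simp [he0, he1]
  · have q0 : (ed e 0).toNat ≠ u.toNat := by
      have : ed e 0 ≠ u := by simpa using he0
      omega
    have q1 : (ed e 1).toNat ≠ u.toNat := by
      have : ed e 1 ≠ u := by simpa using he1
      omega
    rw [getD_set_ne _ _ _ _ _ q1, getD_set_ne _ _ _ _ _ q0]
    simp [he0, he1]

theorem build_aux {n : Int} :
    ∀ (edges : List (List Int)),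
      (∀ e ∈ edges, 3 ≤ e.length ∧ 0 ≤ ed e 0 ∧ ed e 0 < n ∧ 0 ≤ ed e 1 ∧ ed e 1 < n) →
      ∀ (acc : List (List (Int × Int))), (acc.length : Int) = n →
      ∃ res, edges.foldlM buildStep acc = some res ∧
        ∀ u : Int, 0 ≤ u → u < n →
          PySem.List.pyGet? res u = some (acc.getD u.toNat [] ++ adjSpec edges u) := by
  intro edges
  induction edges with
  | nil =>
    intro _ acc hlen
    refine ⟨acc, rfl, ?_⟩
    intro u h0 h1
    rw [pyGet?_inrange acc [] u h0 (by omega)]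
    simp [adjSpec]
  | cons e rest ih =>
    intro hpre acc hlen
    obtain ⟨acc', hstep, hlen', hchar⟩ :=
      buildStep_spec acc e hlen (hpre e (List.mem_cons_self ..))
    obtain ⟨res, hfold, hres⟩ :=
      ih (fun e' he' => hpre e' (List.mem_cons_of_mem _ he')) acc' hlen'
    refine ⟨res, ?_, ?_⟩
    · rw [List.foldlM_cons, hstep]; simpa using hfold
    · intro u h0 h1
      rw [hres u h0 h1, hchar u h0 h1]
      simp [adjSpec, List.append_assoc]

theorem build_spec {n : Int} {edges : List (List Int)} (hn : 1 ≤ n)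
    (hpre : ∀ e ∈ edges, 3 ≤ e.length ∧ 0 ≤ ed e 0 ∧ ed e 0 < n ∧ 0 ≤ ed e 1 ∧ ed e 1 < n) :
    ∃ out, buildAdj n edges = some out ∧
      ∀ u : Int, 0 ≤ u → u < n → PySem.List.pyGet? out u = some (adjSpec edges u) := by
  obtain ⟨res, hfold, hres⟩ := build_aux edges hpre (List.replicate n.toNat [])
    (by simp; omega)
  refine ⟨res, hfold, ?_⟩
  intro u h0 h1
  rw [hres u h0 h1, getD_replicate_nil]
  simp

theorem cal_eq {n : Int} {edges : List (List Int)} {out : List (List (Int × Int))}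
    (hpre : ∀ e ∈ edges, 3 ≤ e.length ∧ 0 ≤ ed e 0 ∧ ed e 0 < n ∧ 0 ≤ ed e 1 ∧ ed e 1 < n)
    (hadj : ∀ u : Int, 0 ≤ u → u < n → PySem.List.pyGet? out u = some (adjSpec edges u))
    (src : Int) (hsrc : 0 ≤ src ∧ src < n) (fuel : Nat) :
    calA n out src fuel = dijB n edges src fuel := by
  unfold calA dijB
  refine loop_eq hpre hadj fuel _ _ _ _ (List.Perm.refl _) ?_ ?_
  · simp [SortedQ, pqPush]
  · intro x hx
    have : x = (0, src) := by simpa [pqPush] using hx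
    subst this
    exact hsrc

theorem enumerate_cons (x : List Int) (t : List (List Int)) (k : Int) :
    PySem.List.enumerate (x :: t) k = (k, x) :: PySem.List.enumerate t (k + 1) := by
  simp [PySem.List.enumerate]

-- A's index loop that sets ans[i] is B's map
theorem enum_fold_map (f : List Int → Bool) :
    ∀ (l : List (List Int)) (k : Nat) (acc : List Bool),
      acc.length = k + l.length → acc.drop k = List.replicate l.length false →
      (PySem.List.enumerate l (k : Int)).foldl
        (fun ans ie => if f ie.2 then ans.set ie.1.toNat true else ans) acc
        = acc.take k ++ l.map f := by
  intro l
  induction l with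
  | nil =>
    intro k acc h1 h2
    simp at h1
    simp [PySem.List.enumerate, List.take_of_length_le (le_of_eq h1)]
  | cons x t ih =>
    intro k acc h1 h2
    rw [enumerate_cons]
    simp only [List.foldl_cons, Int.toNat_natCast]
    have hk : k < acc.length := by simp at h1; omega
    have hgk : acc[k]? = some false := by
      have h0 := congrArg (fun l : List Bool => l[0]?) h2
      simpa [List.getElem?_drop, List.replicate_succ] using h0
    have hdrop : acc.drop (k + 1) = List.replicate t.length false := by
      have h3 : (acc.drop k).drop 1 = List.replicate t.length false := by
        rw [h2]; simp [List.replicate_succ]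
      rw [← h3, List.drop_drop]
    have hlen : acc.length = k + (t.length + 1) := by simpa using h1
    by_cases hfx : f x = true
    · rw [if_pos hfx]
      have ihr := ih (k + 1) (acc.set k true) (by simp; omega)
        (by rw [List.drop_set_of_lt (by omega)]; exact hdrop)
      have hcast : ((k : Int) + 1) = ((k + 1 : Nat) : Int) := by push_cast; ring
      rw [hcast, ihr]
      rw [List.take_succ, List.take_set_of_le (le_refl k)]
      simp [List.getElem?_set, hk, hfx]
    · rw [if_neg hfx]
      have ihr := ih (k + 1) acc (by omega) hdrop
      have hcast : ((k : Int) + 1) = ((k + 1 : Nat) : Int) := by push_cast; ring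
      rw [hcast, ihr]
      rw [List.take_succ, hgk]
      have hfx' : f x = false := by revert hfx; cases f x <;> simp
      simp [hfx']

-- (x + y) + w = (x + w) + y on possibly-infinite values
theorem opt_regroup (a b : Option Int) (w : Int) :
    optAddW (optAdd2 a b) w = optAdd2 (optAddW a w) b := by
  cases a <;> cases b <;> simp [optAddW, optAdd2] <;> ring

-- ===== VERDICT (by name: the statement is the Claim_ definition above) =====
theorem findAnswer_spec : Claim_equal_findAnswer := by
  unfold Claim_equal_findAnswer
  intro n edges _ hpre
  unfold Spec_findAnswer
  obtain ⟨hn, hpre'⟩ := hpre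
  obtain ⟨out, hbuild, hadj⟩ := build_spec hn hpre'
  simp only [findAnswer, findAnswer_alt, hbuild]
  rw [cal_eq hpre' hadj 0 ⟨le_refl 0, by omega⟩ (dijFuel edges),
      cal_eq hpre' hadj (n - 1) ⟨by omega, by omega⟩ (dijFuel edges)]
  cases hmin : (dijB n edges 0 (dijFuel edges)).getD (n - 1) none with
  | none => simp only [hmin]
  | some m =>
    simp only [hmin]
    rw [PySem.List.foldl_congr_mem _ _
      (fun (ans : List Bool) (ie : Int × List Int) =>
        if (optAdd2 (optAddW ((dijB n edges 0 (dijFuel edges)).getD (ed ie.2 0) none) (ed ie.2 2))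
              ((dijB n edges (n - 1) (dijFuel edges)).getD (ed ie.2 1) none) == some m
            || optAdd2 (optAddW ((dijB n edges 0 (dijFuel edges)).getD (ed ie.2 1) none) (ed ie.2 2))
              ((dijB n edges (n - 1) (dijFuel edges)).getD (ed ie.2 0) none) == some m)
          then ans.set ie.1.toNat true else ans) _ ?_]
    · have := enum_fold_map
        (fun e =>
          optAdd2 (optAddW ((dijB n edges 0 (dijFuel edges)).getD (ed e 0) none) (ed e 2))
            ((dijB n edges (n - 1) (dijFuel edges)).getD (ed e 1) none) == some m
          || optAdd2 (optAddW ((dijB n edges 0 (dijFuel edges)).getD (ed e 1) none) (ed e 2))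
            ((dijB n edges (n - 1) (dijFuel edges)).getD (ed e 0) none) == some m)
        edges 0 (List.replicate edges.length false) (by simp) (by simp)
      simpa using this
    · intro ans ie _
      simp only [opt_regroup, optLt, Bool.and_true]
      by_cases h1 : (optAdd2 (optAddW ((dijB n edges 0 (dijFuel edges)).getD (ed ie.2 0) none) (ed ie.2 2))
          ((dijB n edges (n - 1) (dijFuel edges)).getD (ed ie.2 1) none) == some m) = true <;>
      by_cases h2 : (optAdd2 (optAddW ((dijB n edges 0 (dijFuel edges)).getD (ed ie.2 1) none) (ed ie.2 2))
          ((dijB n edges (n - 1) (dijFuel edges)).getD (ed ie.2 0) none) == some m) = true <;>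
      simp [h1, h2]
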